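-- pv_equiv track=rewrite | github.com/pypi-data/pypi-mirror-10 | packages/abydos/abydos-0.2.0.tar.gz/abydos-0.2.0/abydos/stemmer.py | _m_degree
-- ===== SOURCE A (Python) =====
-- def _m_degree(term, vowels):
--     """Porter helper function _m_degree
--
--     m-degree is equal to the number of V to C transitions
--
--     :param term: the word for which to calculate the m-degree
--     :param vowels: the set of vowels in the language
--     :returns: the m-degree as defined in the Porter stemmer definition
--     """
--     mdeg = 0
--     last_was_vowel = False
--     for letter in term:
--         if letter in vowels:
--             last_was_vowel = True
--         else:
--             if last_was_vowel:
--                 mdeg += 1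
--             last_was_vowel = False
--     return mdeg
-- ===== SOURCE B (Python) =====
-- def _m_degree(term, vowels):
--     """Count V->C transitions by alternately scanning maximal consonant
--     and vowel runs with an index cursor (run-skipping), instead of a
--     per-letter loop carrying a last_was_vowel flag."""
--     mdeg = 0
--     i, n = 0, len(term)
--     while True:
--         while i < n and term[i] not in vowels:
--             i += 1
--         if i == n:
--             return mdeg
--         i += 1
--         while i < n and term[i] in vowels:
--             i += 1
--         if i == n:
--             return mdeg
--         mdeg += 1
-- ===== Notes on version B (the rewrite author's own statement) =====
-- stated objective: alternative
-- what changed: B replaces A's single per-letter loop with a last_was_vowel flag by an index-cursor run-skipping scan: it alternately skips a maximal consonant run and a maximal vowel run and counts one m-degree per completed vowel-run-followed-by-consonant, keeping no boolean state.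
import Mathlib
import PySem

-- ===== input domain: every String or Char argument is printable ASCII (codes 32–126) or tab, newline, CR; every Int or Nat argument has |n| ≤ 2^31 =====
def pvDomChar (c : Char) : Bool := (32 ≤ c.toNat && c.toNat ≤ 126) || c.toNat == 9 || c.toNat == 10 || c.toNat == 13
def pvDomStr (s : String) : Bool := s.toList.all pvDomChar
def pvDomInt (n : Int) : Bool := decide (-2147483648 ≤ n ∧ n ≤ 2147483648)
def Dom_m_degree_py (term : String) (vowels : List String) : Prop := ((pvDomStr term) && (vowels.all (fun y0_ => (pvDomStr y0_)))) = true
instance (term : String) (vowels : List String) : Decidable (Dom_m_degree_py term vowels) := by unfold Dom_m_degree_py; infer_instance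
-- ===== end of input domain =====

-- B replaces A's per-letter loop with a last_was_vowel flag by an index-cursor scan that
-- alternately skips maximal consonant and vowel runs, counting one per vowel-run followed
-- by a consonant (alternative decomposition, same cost).

-- ===== PORT A =====
-- A's loop: state (mdeg, last_was_vowel), one step per letter, branches in A's order.
def mDegStepA (vowels : List String) (s : Int × Bool) (letter : Char) : Int × Bool :=
  if vowels.contains (String.mk [letter]) then
    (s.1, true)
  else
    (if s.2 then s.1 + 1 else s.1, false)

def m_degree_py (term : String) (vowels : List String) : Int :=
  (term.toList.foldl (mDegStepA vowels) (0, false)).1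

-- ===== PORT B =====
-- 'letter in vowels' membership test
def pvMem (vowels : List String) (c : Char) : Bool := vowels.contains (String.mk [c])

-- the inner 'while i < n and p(term[i]): i += 1' loops of B
def skipWhileIdx (p : Char → Bool) (cs : List Char) (i : Nat) : Nat :=
  if h : i < cs.length then
    if p cs[i] then skipWhileIdx p cs (i + 1) else i
  else i
termination_by cs.length - i

theorem skipWhileIdx_ge (p : Char → Bool) (cs : List Char) (i : Nat) :
    i ≤ skipWhileIdx p cs i := by
  unfold skipWhileIdx
  split
  · split
    · exact Nat.le_trans (Nat.le_succ i) (skipWhileIdx_ge p cs (i + 1))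
    · exact Nat.le_refl i
  · exact Nat.le_refl i
termination_by cs.length - i

theorem skipWhileIdx_le (p : Char → Bool) (cs : List Char) (i : Nat)
    (h : i ≤ cs.length) : skipWhileIdx p cs i ≤ cs.length := by
  unfold skipWhileIdx
  split
  · split
    · exact skipWhileIdx_le p cs (i + 1) (by omega)
    · exact h
  · exact h
termination_by cs.length - i

-- B's outer loop ('while True: ...'); i1/i2 are the cursor after the consonant-run and
-- vowel-run skips; the hypothesis hi only makes the recursion well founded
def mLoopB (vowels : List String) (cs : List Char) (mdeg : Int) (i : Nat)
    (hi : i ≤ cs.length) : Int :=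
  if h1 : skipWhileIdx (fun c => !(pvMem vowels c)) cs i = cs.length then mdeg
  else if h2 : skipWhileIdx (pvMem vowels) cs
      (skipWhileIdx (fun c => !(pvMem vowels c)) cs i + 1) = cs.length then mdeg
  else
    mLoopB vowels cs (mdeg + 1)
      (skipWhileIdx (pvMem vowels) cs (skipWhileIdx (fun c => !(pvMem vowels c)) cs i + 1))
      (skipWhileIdx_le _ cs _
        (by have := skipWhileIdx_le (fun c => !(pvMem vowels c)) cs i hi; omega))
termination_by cs.length - i
decreasing_by
  have hg1 := skipWhileIdx_ge (fun c => !(pvMem vowels c)) cs i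
  have hl1 := skipWhileIdx_le (fun c => !(pvMem vowels c)) cs i hi
  have hg2 := skipWhileIdx_ge (pvMem vowels) cs
    (skipWhileIdx (fun c => !(pvMem vowels c)) cs i + 1)
  have hl2 := skipWhileIdx_le (pvMem vowels) cs
    (skipWhileIdx (fun c => !(pvMem vowels c)) cs i + 1) (by omega)
  omega

def m_degree_py_alt (term : String) (vowels : List String) : Int :=
  mLoopB vowels term.toList 0 0 (Nat.zero_le _)

-- ===== PRECONDITION & SPEC =====
def Spec_m_degree_py (term : String) (vowels : List String) (out : Int) : Prop := out = m_degree_py_alt term vowels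
instance (term : String) (vowels : List String) (out : Int) : Decidable (Spec_m_degree_py term vowels out) := by unfold Spec_m_degree_py; infer_instance

-- ===== CLAIM (what is proved, stated in full; the proofs are below) =====
def Claim_equal_m_degree_py : Prop := ∀ (term : String) (vowels : List String), Dom_m_degree_py term vowels → Spec_m_degree_py term vowels (m_degree_py term vowels)

-- ===== LEMMAS AND PROOFS =====

-- number of adjacent (true, false) pairs in a boolean list
def cntVC : List Bool → Int
  | a :: b :: t => (if a && !b then 1 else 0) + cntVC (b :: t)
  | _ => 0

theorem foldlA_eq_cntVC (vowels : List String) (cs : List Char) (m : Int) (lv : Bool) :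
    (cs.foldl (mDegStepA vowels) (m, lv)).1
      = m + cntVC (lv :: cs.map (fun c => pvMem vowels c)) := by
  induction cs generalizing m lv with
  | nil => simp [cntVC]
  | cons c t ih =>
    simp only [List.foldl_cons, List.map_cons, mDegStepA, pvMem]
    by_cases h : String.mk [c] ∈ vowels
    · simp [h, ih, cntVC, pvMem]
    · cases lv <;> simp [h, ih, cntVC, pvMem] <;> ring

theorem skipWhileIdx_stop (p : Char → Bool) (cs : List Char) (i : Nat)
    (h : skipWhileIdx p cs i < cs.length) :
    p (cs.getD (skipWhileIdx p cs i) default) = false := by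
  by_cases hlt : i < cs.length
  · by_cases hp : p cs[i] = true
    · have e : skipWhileIdx p cs i = skipWhileIdx p cs (i + 1) := by
        rw [skipWhileIdx]; simp [hlt, hp]
      rw [e] at h ⊢
      exact skipWhileIdx_stop p cs (i + 1) h
    · have e : skipWhileIdx p cs i = i := by
        rw [skipWhileIdx]; simp [hlt, hp]
      rw [e] at h ⊢
      rw [List.getD_eq_getElem cs default h]
      simpa using hp
  · have e : skipWhileIdx p cs i = i := by
      rw [skipWhileIdx]; simp [hlt]
    rw [e] at h; omega
termination_by cs.length - i

theorem cnt_skipC (vowels : List String) (cs : List Char) (i : Nat) :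
    cntVC (false :: ((cs.drop (skipWhileIdx (fun c => !(pvMem vowels c)) cs i)).map (pvMem vowels)))
      = cntVC (false :: ((cs.drop i).map (pvMem vowels))) := by
  rw [skipWhileIdx]
  split
  · rename_i h
    split
    · rename_i hp
      rw [cnt_skipC vowels cs (i + 1)]
      rw [List.drop_eq_getElem_cons h, List.map_cons]
      have hv : pvMem vowels cs[i] = false := by simpa using hp
      rw [hv]; simp [cntVC]
    · rfl
  · rfl
termination_by cs.length - i

theorem cnt_skipV (vowels : List String) (cs : List Char) (i : Nat) :
    cntVC (true :: ((cs.drop (skipWhileIdx (pvMem vowels) cs i)).map (pvMem vowels)))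
      = cntVC (true :: ((cs.drop i).map (pvMem vowels))) := by
  rw [skipWhileIdx]
  split
  · rename_i h
    split
    · rename_i hp
      rw [cnt_skipV vowels cs (i + 1)]
      rw [List.drop_eq_getElem_cons h, List.map_cons, hp]
      simp [cntVC]
    · rfl
  · rfl
termination_by cs.length - i

theorem mLoopB_eq_cntVC (vowels : List String) (cs : List Char) (m : Int) (i : Nat)
    (hi : i ≤ cs.length) :
    mLoopB vowels cs m i hi = m + cntVC (false :: ((cs.drop i).map (pvMem vowels))) := by
  rw [mLoopB]
  set i1 := skipWhileIdx (fun c => !(pvMem vowels c)) cs i with hi1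
  have hc1 : cntVC (false :: ((cs.drop i1).map (pvMem vowels)))
      = cntVC (false :: ((cs.drop i).map (pvMem vowels))) := by
    rw [hi1]; exact cnt_skipC vowels cs i
  have hl1 : i1 ≤ cs.length := by rw [hi1]; exact skipWhileIdx_le _ cs i hi
  by_cases h1 : i1 = cs.length
  · rw [dif_pos h1, ← hc1, h1]; simp [cntVC]
  · rw [dif_neg h1]
    have hlt1 : i1 < cs.length := by omega
    have hv1 : pvMem vowels (cs[i1]'hlt1) = true := by
      have hstop := skipWhileIdx_stop (fun c => !(pvMem vowels c)) cs i (by rw [← hi1]; omega)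
      rw [← hi1] at hstop
      rw [List.getD_eq_getElem cs default hlt1] at hstop
      simpa using hstop
    set i2 := skipWhileIdx (pvMem vowels) cs (i1 + 1) with hi2
    have hl2 : i2 ≤ cs.length := by rw [hi2]; exact skipWhileIdx_le _ cs (i1 + 1) (by omega)
    have hc2 : cntVC (true :: ((cs.drop i2).map (pvMem vowels)))
        = cntVC (true :: ((cs.drop (i1 + 1)).map (pvMem vowels))) := by
      rw [hi2]; exact cnt_skipV vowels cs (i1 + 1)
    have hstep1 : cntVC (false :: ((cs.drop i).map (pvMem vowels)))
        = cntVC (true :: ((cs.drop (i1 + 1)).map (pvMem vowels))) := by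
      rw [← hc1, List.drop_eq_getElem_cons hlt1, List.map_cons, hv1]
      simp [cntVC]
    by_cases h2 : i2 = cs.length
    · rw [dif_pos h2, hstep1, ← hc2, h2]; simp [cntVC]
    · rw [dif_neg h2]
      have hlt2 : i2 < cs.length := by omega
      have hv2 : pvMem vowels (cs[i2]'hlt2) = false := by
        have hstop := skipWhileIdx_stop (pvMem vowels) cs (i1 + 1) (by rw [← hi2]; omega)
        rw [← hi2] at hstop
        rw [List.getD_eq_getElem cs default hlt2] at hstop
        exact hstop
      rw [mLoopB_eq_cntVC vowels cs (m + 1) i2 hl2]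
      rw [hstep1, ← hc2, List.drop_eq_getElem_cons hlt2, List.map_cons, hv2]
      simp [cntVC]
      ring
termination_by cs.length - i
decreasing_by
  rw [← hi1]
  have hg1 : i ≤ i1 := by rw [hi1]; exact skipWhileIdx_ge _ cs i
  have hg2 := skipWhileIdx_ge (pvMem vowels) cs (i1 + 1)
  have hl2' : skipWhileIdx (pvMem vowels) cs (i1 + 1) ≤ cs.length :=
    skipWhileIdx_le _ cs (i1 + 1) (by omega)
  omega

-- ===== VERDICT (by name: the statement is the Claim_ definition above) =====
theorem m_degree_py_spec : Claim_equal_m_degree_py := by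
  intro term vowels _
  unfold Spec_m_degree_py m_degree_py m_degree_py_alt
  rw [foldlA_eq_cntVC, mLoopB_eq_cntVC]
  simp
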